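-- pv_equiv track=rewrite | github.com/MTrajK/coding-problems | Hashing DS/perfect_rectangle.py | is_perfect_rectangle
-- ===== SOURCE A (Python) =====
-- import math
--
-- def is_perfect_rectangle(rectangles):
--     areas_sum = 0
--     all_points = set()
--
--     for rect in rectangles:
--         # sum the areas of all rectangles
--         areas_sum += (rect[2] - rect[0]) * (rect[3] - rect[1])
--
--         # find all points of the rectangle and check if they already exist
--         rect_points = [
--             (rect[0], rect[1]),   # left bottom
--             (rect[0], rect[3]),   # left top
--             (rect[2], rect[3]),   # right top
--             (rect[2], rect[1])    # right bottom
--         ]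
--
--         for point in rect_points:
--             if point in all_points:
--                 all_points.remove(point)
--             else:
--                 all_points.add(point)
--
--     # if we want a perfect rectangle then the rectangle must have 4 unique points
--     if len(all_points) != 4:
--         return False
--
--     # find the bounding rectangle coordinates (minX, minY, maxX, maxY)
--     bounding_rectangle = [math.inf, math.inf, -math.inf, -math.inf]
--     for point in all_points:
--         bounding_rectangle = [
--             min(bounding_rectangle[0], point[0]),
--             min(bounding_rectangle[1], point[1]),
--             max(bounding_rectangle[2], point[0]),
--             max(bounding_rectangle[3], point[1])
--         ]
--
--     # calculate the area of bounding rectangle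
--     bounding_rectangle_area = (bounding_rectangle[2] - bounding_rectangle[0]) * (bounding_rectangle[3] - bounding_rectangle[1])
--
--     # to see if there are overlapping, compare the sum of areas with the final rectangle area
--     return areas_sum == bounding_rectangle_area
-- ===== SOURCE B (Python) =====
-- def is_perfect_rectangle(rectangles):
--     # sort all corners, then one groupby-style scan keeps corners with odd multiplicity
--     areas_sum = sum((r[2] - r[0]) * (r[3] - r[1]) for r in rectangles)
--     corners = sorted(c for r in rectangles
--                      for c in ((r[0], r[1]), (r[0], r[3]), (r[2], r[3]), (r[2], r[1])))
--     survivors = []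
--     cur, run = None, 0
--     for p in corners:
--         if p == cur:
--             run += 1
--         else:
--             if run % 2 == 1:
--                 survivors.append(cur)
--             cur, run = p, 1
--     if run % 2 == 1:
--         survivors.append(cur)
--     if len(survivors) != 4:
--         return False
--     xs = [p[0] for p in survivors]
--     ys = [p[1] for p in survivors]
--     return areas_sum == (max(xs) - min(xs)) * (max(ys) - min(ys))
-- ===== Notes on version B (the rewrite author's own statement) =====
-- stated objective: alternative
-- what changed: A interleaves area summing with a hash-set add/remove toggle per corner and scans the set with infinity-seeded min/max; B uses no hash structure at all: it sums areas with sum(), sorts the flat list of all 4n corners, extracts the odd-multiplicity corners by a single run-length (groupby-style) scan of the sorted list, and takes min/max over the four survivors.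
import Mathlib
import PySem

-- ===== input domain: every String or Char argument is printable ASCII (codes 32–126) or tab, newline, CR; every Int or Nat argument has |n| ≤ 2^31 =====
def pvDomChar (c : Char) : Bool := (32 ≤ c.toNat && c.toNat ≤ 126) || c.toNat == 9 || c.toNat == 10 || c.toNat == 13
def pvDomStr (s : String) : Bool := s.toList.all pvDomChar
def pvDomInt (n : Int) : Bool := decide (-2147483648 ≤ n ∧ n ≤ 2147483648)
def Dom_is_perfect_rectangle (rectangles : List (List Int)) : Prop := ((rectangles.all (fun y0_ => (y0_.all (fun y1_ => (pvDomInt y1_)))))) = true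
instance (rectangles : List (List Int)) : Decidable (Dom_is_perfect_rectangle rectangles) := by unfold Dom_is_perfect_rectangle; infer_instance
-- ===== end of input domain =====

-- B replaces A's hash-set add/remove toggle by sorting the flat corner list and extracting the
-- odd-multiplicity corners with one run-length scan, then min/max over the four survivors
-- (objective: alternative).

-- shared accessors: both Pythons read rect[0..3] (exact under Pre_: all indices in range) and
-- form the same four corners / the same rectangle area
def pvCorners (rect : List Int) : List (Int × Int) :=
  let x1 := PySem.List.pyGetD rect 0 0
  let y1 := PySem.List.pyGetD rect 1 0
  let x2 := PySem.List.pyGetD rect 2 0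
  let y2 := PySem.List.pyGetD rect 3 0
  [(x1, y1), (x1, y2), (x2, y2), (x2, y1)]

def pvArea (rect : List Int) : Int :=
  (PySem.List.pyGetD rect 2 0 - PySem.List.pyGetD rect 0 0) *
  (PySem.List.pyGetD rect 3 0 - PySem.List.pyGetD rect 1 0)

-- ===== PORT A =====
-- Python: if point in all_points: all_points.remove(point) else: all_points.add(point)
-- (remove? is exact: the branch guarantees membership, so getD never fires)
def pvToggle (s : PySem.Set (Int × Int)) (p : Int × Int) : PySem.Set (Int × Int) :=
  if PySem.Set.contains s p then (PySem.Set.remove? s p).getD s else PySem.Set.add s p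

def pvStepA (st : Int × PySem.Set (Int × Int)) (rect : List Int) : Int × PySem.Set (Int × Int) :=
  (st.1 + pvArea rect, (pvCorners rect).foldl pvToggle st.2)

def is_perfect_rectangle (rectangles : List (List Int)) : Bool :=
  let st := rectangles.foldl pvStepA (0, PySem.Set.empty)
  if PySem.Set.len st.2 ≠ 4 then false
  else
    -- Python starts the bounding scan at ±math.inf; starting from the first point is exact here
    -- because the set has 4 ≥ 1 points, and min/max accumulation over a set is independent of
    -- Python's set iteration order
    match st.2 with
    | [] => false
    | q :: rest =>
      let bb := rest.foldl (fun (b : Int × Int × Int × Int) p =>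
        (min b.1 p.1, min b.2.1 p.2, max b.2.2.1 p.1, max b.2.2.2 p.2)) (q.1, q.2, q.1, q.2)
      st.1 == (bb.2.2.1 - bb.1) * (bb.2.2.2 - bb.2.1)

-- ===== PORT B =====
-- Python: if run % 2 == 1: survivors.append(cur)  (cur is never None when run is odd)
def pvFlush (acc : List (Int × Int)) (cur : Option (Int × Int)) (run : Int) : List (Int × Int) :=
  if PySem.Int.mod run 2 == 1 then acc ++ cur.toList else acc

-- Python loop body: if p == cur: run += 1  else: flush; cur, run = p, 1
def pvGroupStep (st : List (Int × Int) × Option (Int × Int) × Int) (p : Int × Int) :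
    List (Int × Int) × Option (Int × Int) × Int :=
  if some p == st.2.1 then (st.1, st.2.1, st.2.2 + 1)
  else (pvFlush st.1 st.2.1 st.2.2, some p, 1)

def is_perfect_rectangle_alt (rectangles : List (List Int)) : Bool :=
  let areas_sum := (rectangles.map pvArea).sum
  -- sorted(tuples): Python's lexicographic tuple order = toLex on Int × Int
  let corners := PySem.List.sorted (rectangles.flatMap pvCorners) (fun p => toLex p)
  let st := corners.foldl pvGroupStep ([], none, 0)
  let survivors := pvFlush st.1 st.2.1 st.2.2
  if survivors.length ≠ 4 then false
  else
    match PySem.List.min? (survivors.map (·.1)) (fun x => x),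
          PySem.List.max? (survivors.map (·.1)) (fun x => x),
          PySem.List.min? (survivors.map (·.2)) (fun x => x),
          PySem.List.max? (survivors.map (·.2)) (fun x => x) with
    | some a, some c, some b, some d => areas_sum == (c - a) * (d - b)
    | _, _, _, _ => false

-- ===== PRECONDITION & SPEC =====
-- Pre_ excludes exactly the inputs where A raises IndexError: a rectangle with fewer than 4 entries.
def Pre_is_perfect_rectangle (rectangles : List (List Int)) : Prop :=
  ∀ r ∈ rectangles, 4 ≤ r.length
instance (rectangles : List (List Int)) : Decidable (Pre_is_perfect_rectangle rectangles) := by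
  unfold Pre_is_perfect_rectangle; infer_instance
def pvWitness_is_perfect_rectangle : List (List Int) := [[0, 0, 1, 1], [1, 0, 2, 1]]

def Spec_is_perfect_rectangle (rectangles : List (List Int)) (out : Bool) : Prop := out = is_perfect_rectangle_alt rectangles
instance (rectangles : List (List Int)) (out : Bool) : Decidable (Spec_is_perfect_rectangle rectangles out) := by unfold Spec_is_perfect_rectangle; infer_instance

-- ===== CLAIM (what is proved, stated in full; the proofs are below) =====
def Claim_equal_is_perfect_rectangle : Prop := ∀ (rectangles : List (List Int)), Dom_is_perfect_rectangle rectangles → Pre_is_perfect_rectangle rectangles → Spec_is_perfect_rectangle rectangles (is_perfect_rectangle rectangles)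

-- ===== LEMMAS AND PROOFS =====

-- ---- A side: the toggled set holds exactly the odd-count corners ----

lemma mem_pvToggle (s : List (Int × Int)) (q p : Int × Int) :
    (p ∈ pvToggle s q ↔ ((p ∈ s ∧ p ≠ q) ∨ (p ∉ s ∧ p = q))) := by
  unfold pvToggle
  by_cases hq : q ∈ s
  · rw [if_pos (by simpa [PySem.Set.contains_iff] using hq),
      PySem.Set.remove?_of_mem hq]
    simp [PySem.Set.discard, List.mem_filter]
    by_cases hpq : p = q <;> simp [hpq] <;> tauto
  · rw [if_neg (by simpa [PySem.Set.contains_iff] using hq)]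
    simp [PySem.Set.add, hq]
    by_cases hpq : p = q <;> simp [hpq] <;> tauto

lemma nodup_pvToggle (s : List (Int × Int)) (hs : s.Nodup) (q : Int × Int) :
    (pvToggle s q).Nodup := by
  unfold pvToggle
  by_cases hq : q ∈ s
  · rw [if_pos (by simpa [PySem.Set.contains_iff] using hq),
      PySem.Set.remove?_of_mem hq]
    exact hs.filter _
  · rw [if_neg (by simpa [PySem.Set.contains_iff] using hq)]
    simp [PySem.Set.add, hq]
    exact List.Nodup.append hs (List.nodup_singleton q) (by simpa using hq)

lemma pvToggle_inv (t : List (Int × Int)) : ∀ s : List (Int × Int), s.Nodup →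
    (t.foldl pvToggle s).Nodup ∧
    ∀ p, (p ∈ t.foldl pvToggle s ↔
      ((p ∈ s ∧ t.count p % 2 = 0) ∨ (p ∉ s ∧ t.count p % 2 = 1))) := by
  induction t with
  | nil => intro s hs; simp [hs]
  | cons q t ih =>
    intro s hs
    obtain ⟨hn, hm⟩ := ih (pvToggle s q) (nodup_pvToggle s hs q)
    refine ⟨hn, fun p => ?_⟩
    rw [List.foldl_cons, hm p, mem_pvToggle s q p, List.count_cons]
    by_cases hpq : p = q
    · subst hpq; by_cases hps : p ∈ s <;> simp [hps] <;> omega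
    · by_cases hps : p ∈ s <;> simp [hpq, Ne.symm hpq, hps]

lemma foldA_split (l : List (List Int)) : ∀ (a : Int) (s : PySem.Set (Int × Int)),
    l.foldl pvStepA (a, s) =
      (l.foldl (fun acc r => acc + pvArea r) a, (l.flatMap pvCorners).foldl pvToggle s) := by
  induction l with
  | nil => intro a s; rfl
  | cons r l ih => intro a s; simp [pvStepA, ih, List.foldl_append]

-- ---- B side: the run-length scan of the sorted corner list keeps exactly the odd-count corners ----

lemma scan_aux (s : List (Int × Int)) : ∀ (a : Int × Int) (k : Nat) (acc : List (Int × Int)),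
    s.Pairwise (fun x y => toLex x ≤ toLex y) → (∀ x ∈ s, toLex a ≤ toLex x) →
    acc.Nodup → a ∉ acc → (∀ x ∈ s, x ∉ acc) →
    (pvFlush (s.foldl pvGroupStep (acc, some a, ((k : Int) + 1))).1
      (s.foldl pvGroupStep (acc, some a, ((k : Int) + 1))).2.1
      (s.foldl pvGroupStep (acc, some a, ((k : Int) + 1))).2.2).Nodup ∧
    ∀ p, (p ∈ pvFlush (s.foldl pvGroupStep (acc, some a, ((k : Int) + 1))).1
      (s.foldl pvGroupStep (acc, some a, ((k : Int) + 1))).2.1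
      (s.foldl pvGroupStep (acc, some a, ((k : Int) + 1))).2.2 ↔
      p ∈ acc ∨ (List.replicate (k + 1) a ++ s).count p % 2 = 1) := by
  induction s with
  | nil =>
    intro a k acc _ _ hnd hna _
    simp only [List.foldl_nil, pvFlush]
    have hmod : PySem.Int.mod ((k : Int) + 1) 2 = (((k + 1) % 2 : Nat) : Int) := by
      have h := PySem.Int.mod_natCast (k + 1) 2
      push_cast at h
      exact h
    by_cases hodd : (k + 1) % 2 = 1
    · rw [if_pos (by rw [hmod]; simp only [beq_iff_eq]; omega)]
      refine ⟨?_, fun p => ?_⟩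
      · simp only [Option.toList_some]
        exact List.Nodup.append hnd (List.nodup_singleton a) (by simpa using hna)
      · by_cases hpa : p = a
        · simp [hpa, List.count_replicate, hodd, hna]
        · simp [hpa, Ne.symm hpa, List.count_replicate]
    · rw [if_neg (by rw [hmod]; simp only [beq_iff_eq]; omega)]
      refine ⟨hnd, fun p => ?_⟩
      by_cases hpa : p = a
      · simp [hpa, List.count_replicate, hodd, hna]
      · simp [hpa, Ne.symm hpa, List.count_replicate]
  | cons q t ih =>
    intro a k acc hpw hlb hnd hna hacc
    by_cases hqa : q = a
    · subst hqa
      have hstep : pvGroupStep (acc, some q, ((k : Int) + 1)) q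
          = (acc, some q, ((k : Int) + 1) + 1) := by
        simp [pvGroupStep]
      have hcast : (((k + 1 : Nat) : Int) + 1) = ((k : Int) + 1) + 1 := by push_cast; ring
      rw [List.foldl_cons, hstep, ← hcast]
      obtain ⟨h1, h2⟩ := ih q (k + 1) acc hpw.tail
        (fun x hx => List.rel_of_pairwise_cons hpw hx)
        hnd hna (fun x hx => hacc x (List.mem_cons_of_mem _ hx))
      refine ⟨h1, fun p => ?_⟩
      rw [h2 p]
      have hrep : List.replicate (k + 1 + 1) q ++ t = List.replicate (k + 1) q ++ (q :: t) := by
        rw [List.replicate_succ']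
        simp
      rw [hrep]
    · have hbeq : (some q == some a) = false := by simp [hqa]
      have hstep : pvGroupStep (acc, some a, ((k : Int) + 1)) q
          = (pvFlush acc (some a) ((k : Int) + 1), some q, ((0 : Nat) : Int) + 1) := by
        simp [pvGroupStep, hbeq]
      have hlaq : toLex a ≤ toLex q := hlb q (List.mem_cons_self)
      have hat : a ∉ t := by
        intro hmem
        have h1 : toLex q ≤ toLex a := List.rel_of_pairwise_cons hpw hmem
        exact hqa (toLex.injective (le_antisymm h1 hlaq))
      have hmod : PySem.Int.mod ((k : Int) + 1) 2 = (((k + 1) % 2 : Nat) : Int) := by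
        have h := PySem.Int.mod_natCast (k + 1) 2
        push_cast at h
        exact h
      have hacc' : ∀ p, p ∈ pvFlush acc (some a) ((k : Int) + 1) ↔
          p ∈ acc ∨ ((k + 1) % 2 = 1 ∧ p = a) := by
        intro p
        unfold pvFlush
        by_cases hodd : (k + 1) % 2 = 1
        · rw [if_pos (by rw [hmod]; simp only [beq_iff_eq]; omega)]
          simp [hodd]
        · rw [if_neg (by rw [hmod]; simp only [beq_iff_eq, ne_eq]; omega)]
          simp [hodd]
      have hnd' : (pvFlush acc (some a) ((k : Int) + 1)).Nodup := by
        unfold pvFlush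
        split
        · simp only [Option.toList_some]
          exact List.Nodup.append hnd (List.nodup_singleton a) (by simpa using hna)
        · exact hnd
      rw [List.foldl_cons, hstep]
      obtain ⟨h1, h2⟩ := ih q 0 (pvFlush acc (some a) ((k : Int) + 1)) hpw.tail
        (fun x hx => List.rel_of_pairwise_cons hpw hx)
        hnd'
        (by rw [hacc']
            push_neg
            exact ⟨hacc q List.mem_cons_self, fun _ => hqa⟩)
        (fun x hx => by
          rw [hacc']
          push_neg
          refine ⟨hacc x (List.mem_cons_of_mem _ hx), fun _ hxa => ?_⟩
          exact hat (hxa ▸ hx))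
      refine ⟨h1, fun p => ?_⟩
      rw [h2 p, hacc' p]
      by_cases hpa : p = a
      · subst hpa
        have hct : t.count p = 0 := List.count_eq_zero.2 hat
        have hc1 : (List.replicate (0 + 1) q ++ t).count p = 0 := by
          simp [List.count_replicate, List.count_cons, hqa, hct]
        have hc2 : (List.replicate (k + 1) p ++ (q :: t)).count p = k + 1 := by
          simp [List.count_replicate, List.count_cons, hqa, hct]
        rw [hc1, hc2]
        constructor
        · rintro ((h | h) | h)
          · exact Or.inl h
          · exact Or.inr h.1
          · omega
        · rintro (h | h)
          · exact Or.inl (Or.inl h)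
          · exact Or.inl (Or.inr ⟨h, rfl⟩)
      · have hc : (List.replicate (k + 1) a ++ (q :: t)).count p
            = (List.replicate (0 + 1) q ++ t).count p := by
          simp [List.count_replicate, List.count_cons, Ne.symm hpa]
        rw [hc]
        constructor
        · rintro ((h | h) | h)
          · exact Or.inl h
          · exact absurd h.2 hpa
          · exact Or.inr h
        · rintro (h | h)
          · exact Or.inl (Or.inl h)
          · exact Or.inr h

lemma scan_char (s : List (Int × Int)) (hpw : s.Pairwise (fun x y => toLex x ≤ toLex y)) :
    (pvFlush (s.foldl pvGroupStep ([], none, 0)).1 (s.foldl pvGroupStep ([], none, 0)).2.1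
      (s.foldl pvGroupStep ([], none, 0)).2.2).Nodup ∧
    ∀ p, (p ∈ pvFlush (s.foldl pvGroupStep ([], none, 0)).1 (s.foldl pvGroupStep ([], none, 0)).2.1
      (s.foldl pvGroupStep ([], none, 0)).2.2 ↔ s.count p % 2 = 1) := by
  cases s with
  | nil => refine ⟨by simp [pvFlush, PySem.Int.mod], fun p => by simp [pvFlush, PySem.Int.mod]⟩
  | cons q t =>
    have hstep : pvGroupStep ([], none, 0) q = ([], some q, ((0 : Nat) : Int) + 1) := by
      simp [pvGroupStep, pvFlush, PySem.Int.mod]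
    rw [List.foldl_cons, hstep]
    obtain ⟨h1, h2⟩ := scan_aux t q 0 [] hpw.tail
      (fun x hx => List.rel_of_pairwise_cons hpw hx)
      List.nodup_nil (by simp) (by simp)
    refine ⟨h1, fun p => ?_⟩
    rw [h2 p]
    simp

-- ---- extrema are permutation-invariant ----

lemma minq_perm {l l' : List Int} (h : l.Perm l') :
    PySem.List.min? l (fun x => x) = PySem.List.min? l' (fun x => x) := by
  cases hm : PySem.List.min? l (fun x => x) with
  | none =>
    rw [PySem.List.min?_eq_none_iff _ _] at hm
    subst hm
    exact ((PySem.List.min?_eq_none_iff _ _).2 (by simpa using h.symm.eq_nil)).symm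
  | some m =>
    cases hm' : PySem.List.min? l' (fun x => x) with
    | none =>
      rw [PySem.List.min?_eq_none_iff _ _] at hm'
      subst hm'
      rw [(PySem.List.min?_eq_none_iff _ _).2 h.eq_nil] at hm
      exact absurd hm (by simp)
    | some m' =>
      have h1 := PySem.List.min?_mem hm
      have h2 := PySem.List.min?_mem hm'
      have h3 := PySem.List.min?_isMin hm
      have h4 := PySem.List.min?_isMin hm'
      exact congrArg some (le_antisymm (h3 m' (h.mem_iff.2 h2)) (h4 m (h.mem_iff.1 h1)))

lemma maxq_perm {l l' : List Int} (h : l.Perm l') :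
    PySem.List.max? l (fun x => x) = PySem.List.max? l' (fun x => x) := by
  cases hm : PySem.List.max? l (fun x => x) with
  | none =>
    rw [PySem.List.max?_eq_none_iff _ _] at hm
    subst hm
    exact ((PySem.List.max?_eq_none_iff _ _).2 (by simpa using h.symm.eq_nil)).symm
  | some m =>
    cases hm' : PySem.List.max? l' (fun x => x) with
    | none =>
      rw [PySem.List.max?_eq_none_iff _ _] at hm'
      subst hm'
      rw [(PySem.List.max?_eq_none_iff _ _).2 h.eq_nil] at hm
      exact absurd hm (by simp)
    | some m' =>
      have h1 := PySem.List.max?_mem hm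
      have h2 := PySem.List.max?_mem hm'
      have h3 := PySem.List.max?_isMax hm
      have h4 := PySem.List.max?_isMax hm'
      exact congrArg some (le_antisymm (h4 m (h.mem_iff.1 h1)) (h3 m' (h.mem_iff.2 h2)))

lemma bb_fold (rest : List (Int × Int)) : ∀ a b c d : Int,
    rest.foldl (fun (b : Int × Int × Int × Int) p =>
        (min b.1 p.1, min b.2.1 p.2, max b.2.2.1 p.1, max b.2.2.2 p.2)) (a, b, c, d)
      = ((rest.map Prod.fst).foldl min a, (rest.map Prod.snd).foldl min b,
         (rest.map Prod.fst).foldl max c, (rest.map Prod.snd).foldl max d) := by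
  induction rest with
  | nil => intro a b c d; rfl
  | cons p rest ih => intro a b c d; simp [ih]

theorem main (rectangles : List (List Int)) :
    is_perfect_rectangle rectangles = is_perfect_rectangle_alt rectangles := by
  unfold is_perfect_rectangle is_perfect_rectangle_alt
  dsimp only
  rw [foldA_split, PySem.List.foldl_add]
  set ps := rectangles.flatMap pvCorners with hps
  set S := ps.foldl pvToggle PySem.Set.empty with hS
  set sps := PySem.List.sorted ps (fun p => toLex p) with hsps
  set st := sps.foldl pvGroupStep ([], none, 0) with hst
  set surv := pvFlush st.1 st.2.1 st.2.2 with hsurv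
  obtain ⟨hSnd, hSmem⟩ := pvToggle_inv ps PySem.Set.empty (by simp [PySem.Set.empty])
  rw [← hS] at hSnd hSmem
  obtain ⟨hsnd, hsmem⟩ := scan_char sps (PySem.List.sorted_pairwise ps (fun p => toLex p))
  rw [← hst, ← hsurv] at hsnd hsmem
  have hcnt : ∀ p, sps.count p = ps.count p :=
    fun p => (PySem.List.sorted_perm ps (fun p => toLex p) false).count_eq p
  have hmem : ∀ p, p ∈ S ↔ p ∈ surv := by
    intro p
    rw [hSmem p, hsmem p, hcnt p]
    simp [PySem.Set.empty]
  have hperm : S.Perm surv := (List.perm_ext_iff_of_nodup hSnd hsnd).2 hmem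
  have hlen : S.length = surv.length := hperm.length_eq
  by_cases h4 : surv.length = 4
  · rw [if_neg (by simp [PySem.Set.len, hlen, h4]), if_neg (by simp [h4])]
    rcases hSc : S with _ | ⟨q, rest⟩
    · exact absurd (hSc ▸ hlen) (by simp [h4])
    · dsimp only
      rw [bb_fold]
      rw [hSc] at hperm
      have hpermf : ((q :: rest).map Prod.fst).Perm (surv.map (·.1)) := hperm.map _
      have hperms : ((q :: rest).map Prod.snd).Perm (surv.map (·.2)) := hperm.map _
      have h1 := (minq_perm hpermf).symm
      have h2 := (maxq_perm hpermf).symm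
      have h3 := (minq_perm hperms).symm
      have h4' := (maxq_perm hperms).symm
      rw [List.map_cons, PySem.List.min?_id_cons] at h1
      rw [List.map_cons, PySem.List.max?_id_cons] at h2
      rw [List.map_cons, PySem.List.min?_id_cons] at h3
      rw [List.map_cons, PySem.List.max?_id_cons] at h4'
      rw [h1, h2, h3, h4']
      simp
  · rw [if_pos (by simp [PySem.Set.len, hlen]; omega), if_pos (by simp [h4])]

-- ===== VERDICT (by name: the statement is the Claim_ definition above) =====
theorem is_perfect_rectangle_spec : Claim_equal_is_perfect_rectangle := by
  intro rectangles _ _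
  show is_perfect_rectangle rectangles = is_perfect_rectangle_alt rectangles
  exact main rectangles
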